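-- pv_equiv track=rewrite | github.com/SoerenToennesen/algorithms-practice | CodilityTests/Lesson11_SieveOfEratosthenes/2Medium_CountNonDivisible.py | solution
-- ===== SOURCE A (Python) =====
-- def solution(A):
--     ret = []
--     for i in range(len(A)):
--         count = 0
--         for j in range(len(A)):
--             if i == j:
--                 continue
--             if A[i] % A[j] != 0:
--                 count += 1
--         ret.append(count)
--     return ret
-- ===== SOURCE B (Python) =====
-- def solution(A):
--     # Count occurrences once, then compute the answer once per DISTINCT value:
--     # answer(u) = n - (number of elements of A that divide u, counting u's own copies).
--     n = len(A)
--     cnt = {}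
--     for x in A:
--         cnt[x] = cnt.get(x, 0) + 1
--     memo = {}
--     for u in cnt:
--         d = cnt[u]
--         for v, c in cnt.items():
--             if v != u and u % v == 0:
--                 d += c
--         memo[u] = n - d
--     return [memo[x] for x in A]
-- ===== Notes on version B (the rewrite author's own statement) =====
-- stated objective: alternative
-- what changed: Instead of the all-index-pairs double loop, B builds a value->multiplicity counter once, computes the answer once per DISTINCT value from the counter (self-copies counted via the multiplicity), and maps each element to its memoised answer; O(n + D^2) over D distinct values instead of O(n^2) over indices.
import Mathlib
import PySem

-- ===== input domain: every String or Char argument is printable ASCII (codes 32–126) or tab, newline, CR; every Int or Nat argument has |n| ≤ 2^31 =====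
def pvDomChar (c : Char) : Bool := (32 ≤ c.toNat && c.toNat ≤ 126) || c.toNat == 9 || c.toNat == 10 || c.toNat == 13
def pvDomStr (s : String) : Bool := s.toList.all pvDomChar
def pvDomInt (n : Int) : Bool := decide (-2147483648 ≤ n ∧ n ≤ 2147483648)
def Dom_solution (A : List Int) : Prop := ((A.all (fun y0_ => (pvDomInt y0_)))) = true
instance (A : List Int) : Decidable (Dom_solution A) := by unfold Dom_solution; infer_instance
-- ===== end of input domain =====

-- B replaces A's all-index-pairs double loop by a value->multiplicity counter with one
-- memoised answer per distinct value (objective: alternative algorithm; equal return values,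
-- no argument mutation in either version).

-- ===== PORT A =====
def solution (A : List Int) : List Int :=
  (PySem.List.pyRange 0 (A.length : Int) 1).foldl (fun ret i =>
    ret ++ [(PySem.List.pyRange 0 (A.length : Int) 1).foldl (fun count j =>
      if i = j then count
      else if PySem.Int.mod (PySem.List.pyGetD A i 0) (PySem.List.pyGetD A j 0) ≠ 0 then count + 1
      else count) 0]) []

-- ===== PORT B =====
def solution_alt (A : List Int) : List Int :=
  let n : Int := (A.length : Int)
  let cnt : PySem.Dict Int Int :=
    A.foldl (fun d x => d.insert x (d.getD x 0 + 1)) PySem.Dict.empty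
  let memo : PySem.Dict Int Int :=
    cnt.keys.foldl (fun m u =>
      let d := cnt.items.foldl (fun acc p =>
        if p.1 ≠ u ∧ PySem.Int.mod u p.1 = 0 then acc + p.2 else acc) (cnt.getD u 0)
      m.insert u (n - d)) PySem.Dict.empty
  A.map (fun x => memo.getD x 0)

-- ===== PRECONDITION & SPEC =====
-- Pre_ excludes exactly the inputs on which A raises ZeroDivisionError (a 0 together with
-- at least one other element, i.e. 0 ∈ A with length ≥ 2); A returns on everything else.
def Pre_solution (A : List Int) : Prop := 0 ∉ A ∨ A = [0]
instance (A : List Int) : Decidable (Pre_solution A) := by unfold Pre_solution; infer_instance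
def pvWitness_solution : List Int := [3, 1, 2, 3, 6]

def Spec_solution (A : List Int) (out : List Int) : Prop := out = solution_alt A
instance (A : List Int) (out : List Int) : Decidable (Spec_solution A out) := by unfold Spec_solution; infer_instance

-- ===== CLAIM (what is proved, stated in full; the proofs are below) =====
def Claim_equal_solution : Prop := ∀ (A : List Int), Dom_solution A → Pre_solution A → Spec_solution A (solution A)

-- ===== LEMMAS AND PROOFS =====

-- The common closed form: for an element u of A, the answer is the number of elements of A
-- that do NOT divide u (Python-mod sense; PySem.Int.mod u u = 0 always).
def pvF (A : List Int) (u : Int) : Int :=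
  ((A.countP (fun x => !decide (PySem.Int.mod u x = 0)) : Nat) : Int)

-- A's port computes pvF at each element.
theorem solution_eq_map (A : List Int) : solution A = A.map (pvF A) := by
  unfold solution
  rw [PySem.List.foldl_append_singleton_eq_map
        (f := fun i => (PySem.List.pyRange 0 (A.length : Int) 1).foldl (fun count j =>
          if i = j then count
          else if PySem.Int.mod (PySem.List.pyGetD A i 0) (PySem.List.pyGetD A j 0) ≠ 0 then count + 1
          else count) 0)]
  simp only [List.nil_append]
  have hmap : (PySem.List.pyRange 0 (A.length : Int) 1).map (fun j => PySem.List.pyGetD A j 0) = A := by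
    simpa using PySem.List.map_pyGetD_pyRange_zero A 0
  have hinner : ∀ i : Int,
      (PySem.List.pyRange 0 (A.length : Int) 1).foldl (fun count j =>
          if i = j then count
          else if PySem.Int.mod (PySem.List.pyGetD A i 0) (PySem.List.pyGetD A j 0) ≠ 0 then count + 1
          else count) 0 = pvF A (PySem.List.pyGetD A i 0) := by
    intro i
    have hb : (fun (count j : Int) =>
        if i = j then count
        else if PySem.Int.mod (PySem.List.pyGetD A i 0) (PySem.List.pyGetD A j 0) ≠ 0 then count + 1
        else count)
        = (fun (count j : Int) =>
          if (i ≠ j ∧ PySem.Int.mod (PySem.List.pyGetD A i 0) (PySem.List.pyGetD A j 0) ≠ 0)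
          then count + 1 else count) := by
      funext c j
      by_cases h1 : i = j
      · simp [h1]
      · by_cases h2 : PySem.Int.mod (PySem.List.pyGetD A i 0) (PySem.List.pyGetD A j 0) = 0 <;>
          simp [h1, h2]
    rw [hb, PySem.List.foldl_ite_add_one
        (fun j => i ≠ j ∧ PySem.Int.mod (PySem.List.pyGetD A i 0) (PySem.List.pyGetD A j 0) ≠ 0)]
    rw [List.countP_congr (q := fun j =>
        !decide (PySem.Int.mod (PySem.List.pyGetD A i 0) (PySem.List.pyGetD A j 0) = 0)) ?_]
    · simp only [pvF, zero_add]
      congr 1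
      generalize PySem.List.pyGetD A i 0 = u
      conv_rhs => rw [← hmap]
      rw [List.countP_map]
      rfl
    · intro j _
      by_cases h1 : i = j
      · subst h1
        have : PySem.Int.mod (PySem.List.pyGetD A i 0) (PySem.List.pyGetD A i 0) = 0 :=
          (PySem.Int.mod_eq_zero_iff_dvd _ _).mpr dvd_rfl
        simp [this]
      · simp [h1]
  rw [List.map_congr_left (fun i _ => hinner i),
    show (fun i => pvF A (PySem.List.pyGetD A i 0))
        = pvF A ∘ (fun j => PySem.List.pyGetD A j 0) from rfl,
    ← List.map_map, hmap]

-- Dict fold-insert lookups (specific to B's memo loop).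
theorem getD_foldl_insert_not_mem (l : List Int) (f : Int → Int) (m : PySem.Dict Int Int)
    (x : Int) (hx : x ∉ l) :
    (l.foldl (fun m u => m.insert u (f u)) m).getD x 0 = m.getD x 0 := by
  induction l generalizing m with
  | nil => rfl
  | cons u t ih =>
    simp only [List.mem_cons, not_or] at hx
    simp only [List.foldl_cons]
    rw [ih _ hx.2, PySem.Dict.getD_insert]
    simp [hx.1]

theorem getD_foldl_insert_mem (l : List Int) (f : Int → Int) (m : PySem.Dict Int Int)
    (x : Int) (hx : x ∈ l) :
    (l.foldl (fun m u => m.insert u (f u)) m).getD x 0 = f x := by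
  induction l generalizing m with
  | nil => cases hx
  | cons u t ih =>
    simp only [List.foldl_cons]
    by_cases ht : x ∈ t
    · exact ih _ ht
    · have hxu : x = u := by rcases List.mem_cons.mp hx with h | h; exact h; exact absurd h ht
      subst hxu
      rw [getD_foldl_insert_not_mem t f _ x ht, PySem.Dict.getD_insert]
      simp

-- Counting copies of u plus other divisors of u is counting all divisors of u.
theorem count_add_countP_divides (l : List Int) (u : Int) :
    l.count u + l.countP (fun x => decide (x ≠ u ∧ PySem.Int.mod u x = 0))
      = l.countP (fun x => decide (PySem.Int.mod u x = 0)) := by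
  induction l with
  | nil => rfl
  | cons x t ih =>
    have hm : PySem.Int.mod u u = 0 := (PySem.Int.mod_eq_zero_iff_dvd _ _).mpr dvd_rfl
    rw [List.count_cons, List.countP_cons, List.countP_cons]
    by_cases hx : x = u
    · subst hx
      rw [if_pos (beq_self_eq_true x), if_neg (by simp), if_pos (by simp [hm])]
      omega
    · rw [if_neg (by simp [hx])]
      by_cases h2 : PySem.Int.mod u x = 0
      · rw [if_pos (by simp [hx, h2]), if_pos (by simp [h2])]
        omega
      · rw [if_neg (by simp [h2]), if_neg (by simp [h2])]
        omega

-- B's per-distinct-value divisor accumulation in closed form.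
theorem dval_eq (A : List Int) (u : Int) :
    (PySem.Dict.counter A).items.foldl (fun acc p =>
        if p.1 ≠ u ∧ PySem.Int.mod u p.1 = 0 then acc + p.2 else acc)
      ((PySem.Dict.counter A).getD u 0)
    = ((A.countP (fun x => decide (PySem.Int.mod u x = 0)) : Nat) : Int) := by
  rw [PySem.Dict.items_counter, PySem.Dict.getD_counter, List.foldl_map]
  simp only []
  rw [PySem.List.foldl_ite_eq_foldl_filter
      (p := fun k => k ≠ u ∧ PySem.Int.mod u k = 0)
      (f := fun acc k => acc + ((A.count k : Nat) : Int)),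
    PySem.List.foldl_add]
  have hperm : ((PySem.Set.ofList A).filter (fun k => decide (k ≠ u ∧ PySem.Int.mod u k = 0))).Perm
      (A.dedup.filter (fun k => decide (k ≠ u ∧ PySem.Int.mod u k = 0))) := by
    rw [List.perm_ext_iff_of_nodup ((PySem.Set.nodup_ofList A).filter _) (A.nodup_dedup.filter _)]
    intro a
    simp [List.mem_filter, PySem.Set.mem_ofList, List.mem_dedup]
  rw [(hperm.map (fun k => ((A.count k : Nat) : Int))).sum_eq]
  have hsum := List.sum_map_count_dedup_filter_eq_countP
      (fun k => decide (k ≠ u ∧ PySem.Int.mod u k = 0)) A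
  have hc := count_add_countP_divides A u
  have hcast : ((A.dedup.filter (fun k => decide (k ≠ u ∧ PySem.Int.mod u k = 0))).map
      (fun k => ((A.count k : Nat) : Int))).sum
      = (((A.dedup.filter (fun k => decide (k ≠ u ∧ PySem.Int.mod u k = 0))).map
        (fun k => A.count k)).sum : Int) := by
    rw [Nat.cast_list_sum, List.map_map]; rfl
  rw [hcast, hsum]
  omega

-- B's port computes pvF at each element.
theorem solution_alt_eq_map (A : List Int) : solution_alt A = A.map (pvF A) := by
  unfold solution_alt
  simp only [PySem.Dict.foldl_insert_getD_add_one_eq_counter]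
  refine List.map_congr_left ?_
  intro x hx
  have hxk : x ∈ (PySem.Dict.counter A).keys := by
    rw [PySem.Dict.keys_counter, PySem.Set.mem_ofList]; exact hx
  rw [getD_foldl_insert_mem _ (fun u => (A.length : Int) -
      (PySem.Dict.counter A).items.foldl (fun acc p =>
        if p.1 ≠ u ∧ PySem.Int.mod u p.1 = 0 then acc + p.2 else acc)
      ((PySem.Dict.counter A).getD u 0)) _ _ hxk]
  rw [dval_eq A x]
  have hlen := List.length_eq_countP_add_countP (l := A) (fun x' => decide (PySem.Int.mod x x' = 0))
  simp only [pvF]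
  have : A.countP (fun a => decide ¬(decide (PySem.Int.mod x a = 0)) = true)
      = A.countP (fun a => !decide (PySem.Int.mod x a = 0)) := by
    refine List.countP_congr ?_; intro a _; simp
  rw [this] at hlen
  omega

-- ===== VERDICT (by name: the statement is the Claim_ definition above) =====
theorem solution_spec : Claim_equal_solution := by
  intro A _ _
  unfold Spec_solution
  rw [solution_eq_map, solution_alt_eq_map]
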